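-- pv_equiv track=rewrite | github.com/CBFay/Genome-Project | tetfrombyte.py | tetfrombyte
-- ===== SOURCE A (Python) =====
-- def tetfrombyte(byte, numeric=False):
--
--     nt = {0:'A', 1:'T', 2:'C', 3:'G'}
--     tet = ''
--
--     if numeric == True:
--         for i in range(3, -1, -1):
--             tet += str((byte // 4**i % 4))
--     else:
--         for i in range(3, -1, -1):
--             tet += nt[(byte // 4**i % 4)]
--
--     return tet
-- ===== SOURCE B (Python) =====
-- def tetfrombyte(byte, numeric=False):
--     nt = {0: 'A', 1: 'T', 2: 'C', 3: 'G'}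
--     digits = []
--     q = byte
--     for _ in range(4):
--         d = q % 4
--         q //= 4
--         digits.append(str(d) if numeric else nt[d])
--     return ''.join(reversed(digits))
-- ===== Notes on version B (the rewrite author's own statement) =====
-- stated objective: alternative
-- what changed: B replaces A's independent positional evaluation (byte // 4**i % 4 for i = 3..0) with a single running quotient: four successive d = q % 4; q //= 4 steps collected least-significant first and reversed before joining.
import Mathlib
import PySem

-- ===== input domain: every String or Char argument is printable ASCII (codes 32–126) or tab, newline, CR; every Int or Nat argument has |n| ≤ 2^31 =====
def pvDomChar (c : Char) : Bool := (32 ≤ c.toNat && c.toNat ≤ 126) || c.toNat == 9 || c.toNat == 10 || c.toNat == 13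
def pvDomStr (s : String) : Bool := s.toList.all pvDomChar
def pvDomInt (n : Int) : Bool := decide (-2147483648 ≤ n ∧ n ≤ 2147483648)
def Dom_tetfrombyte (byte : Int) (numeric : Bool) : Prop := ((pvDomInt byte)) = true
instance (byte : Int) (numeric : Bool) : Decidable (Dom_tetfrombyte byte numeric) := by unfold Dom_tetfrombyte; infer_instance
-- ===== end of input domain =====

-- B replaces A's per-position power computation (byte // 4**i % 4) by a single running
-- quotient: four successive divmod-by-4 steps collected least-significant first, then reversed.
-- Objective: alternative decomposition, same cost; return values proved equal for all ints.

-- ===== PORT A =====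
-- nt[k] is ported as (get? k).getD "": the key is mod _ 4, always in {0,1,2,3}, so the
-- lookup always succeeds and Python's KeyError branch is unreachable.
def tetfrombyte (byte : Int) (numeric : Bool) : String :=
  let nt : PySem.Dict Int String := PySem.Dict.ofList [(0, "A"), (1, "T"), (2, "C"), (3, "G")]
  if numeric = true then
    (PySem.List.pyRange 3 (-1) (-1)).foldl
      (fun tet i =>
        tet ++ PySem.Int.toStr (PySem.Int.mod (PySem.Int.floordiv byte ((4:Int) ^ i.toNat)) 4)) ""
  else
    (PySem.List.pyRange 3 (-1) (-1)).foldl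
      (fun tet i =>
        tet ++ ((nt.get? (PySem.Int.mod (PySem.Int.floordiv byte ((4:Int) ^ i.toNat)) 4)).getD ""))
      ""

-- ===== PORT B =====
def tetfrombyte_alt (byte : Int) (numeric : Bool) : String :=
  let nt : PySem.Dict Int String := PySem.Dict.ofList [(0, "A"), (1, "T"), (2, "C"), (3, "G")]
  let st := (PySem.List.pyRange 0 4 1).foldl
    (fun (st : Int × List String) _ =>
      let d := PySem.Int.mod st.1 4
      let q := PySem.Int.floordiv st.1 4
      (q, st.2 ++ [if numeric then PySem.Int.toStr d else (nt.get? d).getD ""]))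
    (byte, [])
  PySem.Str.join "" st.2.reverse

-- ===== PRECONDITION & SPEC =====
def Spec_tetfrombyte (byte : Int) (numeric : Bool) (out : String) : Prop := out = tetfrombyte_alt byte numeric
instance (byte : Int) (numeric : Bool) (out : String) : Decidable (Spec_tetfrombyte byte numeric out) := by unfold Spec_tetfrombyte; infer_instance

-- ===== CLAIM (what is proved, stated in full; the proofs are below) =====
def Claim_equal_tetfrombyte : Prop := ∀ (byte : Int) (numeric : Bool), Dom_tetfrombyte byte numeric → Spec_tetfrombyte byte numeric (tetfrombyte byte numeric)

-- ===== LEMMAS AND PROOFS =====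


-- ===== VERDICT (by name: the statement is the Claim_ definition above) =====
theorem tetfrombyte_spec : Claim_equal_tetfrombyte := by
  intro byte numeric _
  unfold Spec_tetfrombyte tetfrombyte tetfrombyte_alt
  have hr : PySem.List.pyRange 3 (-1) (-1) = [3, 2, 1, 0] := by decide
  have hr' : PySem.List.pyRange 0 4 1 = [0, 1, 2, 3] := by decide
  have h2 : byte / 4 / 4 = byte / 16 := by omega
  have h3 : byte / 16 / 4 = byte / 64 := by omega
  cases numeric <;>
    · refine String.toList_inj.mp ?_
      simp [hr, hr', List.foldl, PySem.Str.join, PySem.Chars.join, List.intercalate, h2, h3]
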